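-- pv_equiv track=rewrite | github.com/Dong-yeong0/problem-solving | 프로그래머스/0/181837. 커피 심부름/커피 심부름.py | solution
-- ===== SOURCE A (Python) =====
-- MENU_LIST = {
--     'americano': 4_500,
--     'cafelatte': 5_000,
-- }
--
-- def solution(order):
--     total_price = 0
--     for menu in order:
--         menu_name = menu.replace("ice", "").replace("hot", "")
--         if menu_name in MENU_LIST:
--             total_price += MENU_LIST[menu_name]
--         elif menu_name == "anything":
--             total_price += MENU_LIST["americano"]
--
--     return total_price
-- ===== SOURCE B (Python) =====
-- MENU_LIST = {
--     'americano': 4_500,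
--     'cafelatte': 5_000,
-- }
--
-- def solution(order):
--     counts = {}
--     for m in order:
--         k = m.replace("ice", "").replace("hot", "")
--         counts[k] = counts.get(k, 0) + 1
--     total = 0
--     for name, cnt in counts.items():
--         if name in MENU_LIST:
--             total += cnt * MENU_LIST[name]
--         elif name == "anything":
--             total += cnt * MENU_LIST["americano"]
--     return total
-- ===== Notes on version B (the rewrite author's own statement) =====
-- stated objective: alternative
-- what changed: B first aggregates the cleaned menu names into a frequency dictionary in one pass and then computes the total as a grouped sum count*price over the distinct keys, replacing A's per-item branch-and-add scan.
import Mathlib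
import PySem

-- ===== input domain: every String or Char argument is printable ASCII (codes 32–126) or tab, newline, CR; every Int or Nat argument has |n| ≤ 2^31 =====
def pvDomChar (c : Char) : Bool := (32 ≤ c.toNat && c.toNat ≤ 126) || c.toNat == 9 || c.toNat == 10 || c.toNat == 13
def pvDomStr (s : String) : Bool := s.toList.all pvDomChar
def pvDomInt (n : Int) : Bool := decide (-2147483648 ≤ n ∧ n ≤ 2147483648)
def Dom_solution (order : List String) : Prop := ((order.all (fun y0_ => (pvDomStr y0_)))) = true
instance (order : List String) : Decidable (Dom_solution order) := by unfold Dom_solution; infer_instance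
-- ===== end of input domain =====

-- B aggregates cleaned names into a frequency dict first, then sums count*price over the distinct keys (alternative decomposition, same cost).

-- ===== PORT A =====
def MENU_LIST : PySem.Dict String Int :=
  PySem.Dict.ofList [("americano", 4500), ("cafelatte", 5000)]

def solution (order : List String) : Int :=
  order.foldl (fun total_price menu =>
    let menu_name := PySem.Str.replace (PySem.Str.replace menu "ice" "") "hot" ""
    if MENU_LIST.contains menu_name then
      total_price + MENU_LIST.getD menu_name 0
    else if menu_name == "anything" then
      total_price + MENU_LIST.getD "americano" 0
    else total_price) 0

-- ===== PORT B =====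
def solution_alt (order : List String) : Int :=
  let counts : PySem.Dict String Int :=
    order.foldl (fun d m =>
      let k := PySem.Str.replace (PySem.Str.replace m "ice" "") "hot" ""
      d.insert k (d.getD k 0 + 1)) PySem.Dict.empty
  counts.items.foldl (fun total kv =>
    if MENU_LIST.contains kv.1 then
      total + kv.2 * MENU_LIST.getD kv.1 0
    else if kv.1 == "anything" then
      total + kv.2 * MENU_LIST.getD "americano" 0
    else total) 0

-- ===== PRECONDITION & SPEC =====
def Spec_solution (order : List String) (out : Int) : Prop := out = solution_alt order
instance (order : List String) (out : Int) : Decidable (Spec_solution order out) := by unfold Spec_solution; infer_instance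

-- ===== CLAIM (what is proved, stated in full; the proofs are below) =====
def Claim_equal_solution : Prop := ∀ (order : List String), Dom_solution order → Spec_solution order (solution order)

-- ===== LEMMAS AND PROOFS =====

-- price of a cleaned menu name, shared shape of both branch chains
def pvPrice (k : String) : Int :=
  if MENU_LIST.contains k then MENU_LIST.getD k 0
  else if k == "anything" then MENU_LIST.getD "americano" 0
  else 0

def pvClean (m : String) : String :=
  PySem.Str.replace (PySem.Str.replace m "ice" "") "hot" ""

-- splitting the sum over a Nodup list at element y
theorem pv_sum_map_discard (f : String → Int) (y : String) :
    ∀ (s : List String), s.Nodup →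
      (s.map f).sum
        = (if y ∈ s then f y else 0)
          + ((s.filter (fun z => !(z == y))).map f).sum := by
  intro s
  induction s with
  | nil => simp
  | cons a s ih =>
    intro h
    rcases List.nodup_cons.mp h with ⟨ha, hs⟩
    by_cases hay : a = y
    · subst hay
      have : s.filter (fun z => !(z == a)) = s :=
        List.filter_eq_self.mpr (fun z hz => by
          simp; exact fun e => ha (e ▸ hz))
      simp [this, ha]
    · have := ih hs
      by_cases hys : y ∈ s <;>
        simp [hay, Ne.symm hay, hys, this] <;> ring

-- grouped sum over distinct elements equals the plain sum
theorem pv_grouped_sum (p : String → Int) :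
    ∀ (ys : List String),
      ((PySem.Set.ofList ys).map (fun k => (ys.count k : Int) * p k)).sum
        = (ys.map p).sum := by
  intro ys
  induction ys with
  | nil => simp [PySem.Set.ofList_nil]
  | cons y ys ih =>
    rw [PySem.Set.ofList_cons]
    have hnd : (PySem.Set.ofList ys).Nodup := PySem.Set.nodup_ofList ys
    have hdis : PySem.Set.discard (PySem.Set.ofList ys) y
        = (PySem.Set.ofList ys).filter (fun z => !(z == y)) := rfl
    have hcong :
        ((PySem.Set.ofList ys).filter (fun z => !(z == y))).map
            (fun k => ((y :: ys).count k : Int) * p k)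
        = ((PySem.Set.ofList ys).filter (fun z => !(z == y))).map
            (fun k => (ys.count k : Int) * p k) := by
      apply List.map_congr_left
      intro k hk
      have hky : ¬ (k == y) = true := by
        have := List.of_mem_filter hk
        simpa using this
      have : (y :: ys).count k = ys.count k := by
        rw [List.count_cons]
        simp [show ¬ y = k from fun e => hky (by simp [e])]
      rw [this]
    have hsplit := pv_sum_map_discard (fun k => (ys.count k : Int) * p k) y _ hnd
    by_cases hys : y ∈ ys
    · have hmem : y ∈ PySem.Set.ofList ys := (PySem.Set.mem_ofList ys y).mpr hys
      rw [List.map_cons, List.sum_cons, hdis, hcong]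
      have hfil : (((PySem.Set.ofList ys).filter (fun z => !(z == y))).map
          (fun k => (ys.count k : Int) * p k)).sum
          = ((PySem.Set.ofList ys).map (fun k => (ys.count k : Int) * p k)).sum
            - (ys.count y : Int) * p y := by
        rw [hsplit]; simp [hmem]
      rw [hfil, ih, List.count_cons_self]
      push_cast
      ring_nf
      simp
    · have hmem : y ∉ PySem.Set.ofList ys := fun h => hys ((PySem.Set.mem_ofList ys y).mp h)
      have hcnt : ys.count y = 0 := List.count_eq_zero.mpr hys
      rw [List.map_cons, List.sum_cons, hdis, hcong]
      have hfil : (((PySem.Set.ofList ys).filter (fun z => !(z == y))).map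
          (fun k => (ys.count k : Int) * p k)).sum
          = ((PySem.Set.ofList ys).map (fun k => (ys.count k : Int) * p k)).sum := by
        rw [hsplit]; simp [hmem]
      rw [hfil, ih, List.count_cons_self, hcnt]
      simp

-- A is the plain sum of prices of cleaned names
theorem pv_solution_eq_sum (order : List String) :
    solution order = ((order.map pvClean).map pvPrice).sum := by
  unfold solution
  have hfun : (fun (total_price : Int) (menu : String) =>
      let menu_name := PySem.Str.replace (PySem.Str.replace menu "ice" "") "hot" ""
      if MENU_LIST.contains menu_name then total_price + MENU_LIST.getD menu_name 0
      else if menu_name == "anything" then total_price + MENU_LIST.getD "americano" 0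
      else total_price)
      = (fun total_price menu => total_price + pvPrice (pvClean menu)) := by
    funext t m
    simp only [pvPrice, pvClean]
    split_ifs <;> simp
  rw [hfun, PySem.List.foldl_add]
  simp [List.map_map, Function.comp_def]

-- B is the grouped sum over the counter of cleaned names
theorem pv_solution_alt_eq_grouped (order : List String) :
    solution_alt order
      = ((PySem.Set.ofList (order.map pvClean)).map
          (fun k => ((order.map pvClean).count k : Int) * pvPrice k)).sum := by
  unfold solution_alt
  have hcounts : (order.foldl (fun d m =>
      let k := PySem.Str.replace (PySem.Str.replace m "ice" "") "hot" ""
      d.insert k (d.getD k 0 + 1)) PySem.Dict.empty)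
      = PySem.Dict.counter (order.map pvClean) := by
    rw [← PySem.Dict.foldl_insert_getD_add_one_eq_counter, List.foldl_map]
    rfl
  rw [hcounts]
  have hfun : (fun (total : Int) (kv : String × Int) =>
      if MENU_LIST.contains kv.1 then total + kv.2 * MENU_LIST.getD kv.1 0
      else if kv.1 == "anything" then total + kv.2 * MENU_LIST.getD "americano" 0
      else total)
      = (fun total kv => total + kv.2 * pvPrice kv.1) := by
    funext t kv
    simp only [pvPrice]
    split_ifs <;> simp
  rw [hfun, PySem.List.foldl_add, PySem.Dict.items_counter]
  simp [List.map_map, Function.comp_def]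

-- ===== VERDICT (by name: the statement is the Claim_ definition above) =====
theorem solution_spec : Claim_equal_solution := by
  intro order _
  unfold Spec_solution
  rw [pv_solution_eq_sum, pv_solution_alt_eq_grouped, pv_grouped_sum]
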